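-- pv_equiv track=rewrite | github.com/BJTU-LiuHe/DPGM | PascalVoc.py | _row_col_dict
-- ===== SOURCE A (Python) =====
-- def _row_col_dict(rows, cols):
--     num_idx = len(rows)
--     rc_dict = {}
--     for idx in range(num_idx):
--         if not rows[idx] in rc_dict.keys():
--             rc_dict[rows[idx]] = [cols[idx]]
--         else:
--             if not cols[idx] in rc_dict[rows[idx]]:
--                 rc_dict[rows[idx]].append(cols[idx])
--
--     return rc_dict
-- ===== SOURCE B (Python) =====
-- def _row_col_dict(rows, cols):
--     # Pass 1: group ALL cols per row (duplicates kept); still indexes cols[idx]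
--     # so an IndexError on mismatched lengths is preserved.
--     groups = {}
--     for idx in range(len(rows)):
--         groups.setdefault(rows[idx], []).append(cols[idx])
--     # Pass 2: dedup each group preserving first-seen order.
--     return {r: list(dict.fromkeys(lst)) for r, lst in groups.items()}
-- ===== Notes on version B (the rewrite author's own statement) =====
-- stated objective: alternative
-- what changed: A fuses grouping and dedup in one loop with a membership test per element; B first groups all cols per row with setdefault/append, then deduplicates each group in a second pass via dict.fromkeys.
-- outside the precondition, e.g. on _row_col_dict([1, 2], [7]): A raises IndexError, B raises IndexError
import Mathlib
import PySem

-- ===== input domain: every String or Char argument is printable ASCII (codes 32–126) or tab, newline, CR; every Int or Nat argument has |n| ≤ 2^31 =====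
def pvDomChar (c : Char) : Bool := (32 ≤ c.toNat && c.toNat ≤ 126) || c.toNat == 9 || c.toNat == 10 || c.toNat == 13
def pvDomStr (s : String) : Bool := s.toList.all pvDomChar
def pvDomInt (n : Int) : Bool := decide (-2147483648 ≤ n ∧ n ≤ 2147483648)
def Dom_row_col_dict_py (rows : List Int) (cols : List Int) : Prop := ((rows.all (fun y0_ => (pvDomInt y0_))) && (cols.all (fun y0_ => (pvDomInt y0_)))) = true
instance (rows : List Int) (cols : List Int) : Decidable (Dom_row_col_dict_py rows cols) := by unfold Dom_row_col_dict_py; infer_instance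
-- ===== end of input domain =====

-- B separates A's fused loop into two passes: group all cols per row, then dedup
-- each group preserving first-seen order (objective: alternative decomposition).

-- ===== PORT A =====
def row_col_dict_py (rows : List Int) (cols : List Int) : List (Int × List Int) :=
  let num_idx : Int := rows.length
  ((PySem.List.pyRange 0 num_idx 1).foldl (fun d idx =>
      if !(d.contains (PySem.List.pyGetD rows idx 0)) then
        d.insert (PySem.List.pyGetD rows idx 0) [PySem.List.pyGetD cols idx 0]
      else
        if !((d.getD (PySem.List.pyGetD rows idx 0) []).contains (PySem.List.pyGetD cols idx 0)) then
          d.modify (PySem.List.pyGetD rows idx 0) [] (· ++ [PySem.List.pyGetD cols idx 0])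
        else d)
    PySem.Dict.empty).items

-- ===== PORT B =====
def row_col_dict_py_alt (rows : List Int) (cols : List Int) : List (Int × List Int) :=
  let groups := (PySem.List.pyRange 0 (rows.length : Int) 1).foldl
      (fun d idx =>
        d.modify (PySem.List.pyGetD rows idx 0) [] (· ++ [PySem.List.pyGetD cols idx 0]))
      PySem.Dict.empty
  groups.items.map (fun p => (p.1, PySem.Set.ofList p.2))

-- ===== PRECONDITION & SPEC =====
-- Pre_ excludes exactly the inputs where A raises IndexError: cols shorter than rows.
def Pre_row_col_dict_py (rows : List Int) (cols : List Int) : Prop :=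
  rows.length ≤ cols.length
instance (rows : List Int) (cols : List Int) : Decidable (Pre_row_col_dict_py rows cols) := by unfold Pre_row_col_dict_py; infer_instance
def pvWitness_row_col_dict_py : List Int × List Int := ([1, 1, 2, 1], [5, 6, 5, 5])

def Spec_row_col_dict_py (rows : List Int) (cols : List Int) (out : List (Int × List Int)) : Prop := out = row_col_dict_py_alt rows cols
instance (rows : List Int) (cols : List Int) (out : List (Int × List Int)) : Decidable (Spec_row_col_dict_py rows cols out) := by unfold Spec_row_col_dict_py; infer_instance

-- ===== CLAIM (what is proved, stated in full; the proofs are below) =====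
def Claim_equal_row_col_dict_py : Prop := ∀ (rows : List Int) (cols : List Int), Dom_row_col_dict_py rows cols → Pre_row_col_dict_py rows cols → Spec_row_col_dict_py rows cols (row_col_dict_py rows cols)

-- ===== LEMMAS AND PROOFS =====

-- the relation between A's dict and B's dict: A's items are B's items with deduped values
def pvInv (a b : PySem.Dict Int (List Int)) : Prop :=
  a.items = b.items.map (fun p => (p.1, PySem.Set.ofList p.2))

theorem pvInv_keys {a b : PySem.Dict Int (List Int)} (h : pvInv a b) :
    a.keys = b.keys := by
  simp only [PySem.Dict.keys, pvInv] at *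
  rw [h, List.map_map]
  rfl

theorem pvOfList_singleton (c : Int) : PySem.Set.ofList [c] = [c] :=
  PySem.Set.ofList_eq_self_of_nodup [c] (by simp)

theorem pvInv_step {a b : PySem.Dict Int (List Int)} (r c : Int)
    (h : pvInv a b) (hnd : b.keys.Nodup) :
    pvInv
      (if !(a.contains r) then a.insert r [c]
       else if !((a.getD r []).contains c) then a.insert r (a.getD r [] ++ [c]) else a)
      (b.insert r (b.getD r [] ++ [c])) := by
  have hak : a.keys = b.keys := pvInv_keys h
  have hand : a.keys.Nodup := hak ▸ hnd
  have hc : a.contains r = b.contains r := by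
    rw [PySem.Dict.contains_eq_decide_mem_keys, PySem.Dict.contains_eq_decide_mem_keys, hak]
  by_cases hb : b.contains r = true
  · -- key present in both dicts
    have hget : b.get? r = some (b.getD r []) := by
      rcases h' : b.get? r with _ | v
      · rw [PySem.Dict.contains_eq_isSome_get?, h'] at hb; simp at hb
      · rw [PySem.Dict.getD_of_get?_eq_some b [] h']
    have hmemb : (r, b.getD r []) ∈ b.items := PySem.Dict.mem_items_of_get?_eq_some b hget
    have hmema : (r, PySem.Set.ofList (b.getD r [])) ∈ a.items := by
      rw [h]; exact List.mem_map.mpr ⟨_, hmemb, rfl⟩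
    have hga : a.getD r [] = PySem.Set.ofList (b.getD r []) :=
      PySem.Dict.getD_of_mem_items a hmema hand []
    have hca : a.contains r = true := by rw [hc]; exact hb
    have hval : ∀ p ∈ b.items, p.1 = r → p.2 = b.getD r [] := by
      intro p hp hpr
      have := PySem.Dict.getD_of_mem_items b (hpr ▸ hp : (r, p.2) ∈ b.items) hnd []
      exact this.symm
    rw [hca]
    simp only [Bool.not_true, Bool.false_eq_true, if_false]
    by_cases hcin : c ∈ b.getD r []
    · -- duplicate col: A leaves its dict unchanged, dedup absorbs B's append
      have hac : (a.getD r []).contains c = true := by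
        rw [hga]; simp [PySem.Set.mem_ofList, hcin]
      rw [hac]
      simp only [Bool.not_true, Bool.false_eq_true, if_false]
      unfold pvInv
      rw [PySem.Dict.items_insert_of_contains _ _ hb, h, List.map_map]
      apply List.map_congr_left
      intro p hp
      simp only [Function.comp]
      by_cases hpr : p.1 = r
      · have hp2 := hval p hp hpr
        simp only [hpr, beq_self_eq_true, if_true, hp2, PySem.Set.ofList_append_singleton,
          PySem.Set.add_of_mem ((PySem.Set.mem_ofList _ _).mpr hcin)]
      · simp [hpr]
    · -- new col: both sides append c to the group
      have hac : (a.getD r []).contains c = false := by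
        rw [hga]
        simp [List.contains_eq_mem, PySem.Set.mem_ofList, hcin]
      rw [hac]
      simp only [Bool.not_false, if_true]
      unfold pvInv
      rw [PySem.Dict.items_insert_of_contains _ _ hb,
          PySem.Dict.items_insert_of_contains _ _ hca, h, List.map_map, List.map_map]
      apply List.map_congr_left
      intro p hp
      simp only [Function.comp]
      by_cases hpr : p.1 = r
      · have hp2 := hval p hp hpr
        have hcnot : c ∉ PySem.Set.ofList (b.getD r []) := by
          simp [PySem.Set.mem_ofList, hcin]
        simp only [hpr, beq_self_eq_true, if_true, hp2, hga,
          PySem.Set.ofList_append_singleton, PySem.Set.add_of_not_mem hcnot]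
      · simp [hpr]
  · -- fresh key in both dicts: the new group is appended at the end
    have hb' : b.contains r = false := by simpa using hb
    have hca : a.contains r = false := by rw [hc]; exact hb'
    rw [hca]
    simp only [Bool.not_false, if_true]
    unfold pvInv
    rw [PySem.Dict.items_insert_of_not_contains _ _ hb',
        PySem.Dict.items_insert_of_not_contains _ _ hca, h, List.map_append,
        PySem.Dict.getD_of_not_contains b [] hb']
    simp [pvOfList_singleton]

-- the invariant is preserved through the whole index loop
theorem pvInv_foldl (rows cols : List Int) (l : List Int)
    (a b : PySem.Dict Int (List Int)) (h : pvInv a b) (hnd : b.keys.Nodup) :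
    pvInv
      (l.foldl (fun d idx =>
        if !(d.contains (PySem.List.pyGetD rows idx 0)) then
          d.insert (PySem.List.pyGetD rows idx 0) [PySem.List.pyGetD cols idx 0]
        else
          if !((d.getD (PySem.List.pyGetD rows idx 0) []).contains (PySem.List.pyGetD cols idx 0)) then
            d.modify (PySem.List.pyGetD rows idx 0) [] (· ++ [PySem.List.pyGetD cols idx 0])
          else d) a)
      (l.foldl (fun d idx =>
        d.modify (PySem.List.pyGetD rows idx 0) [] (· ++ [PySem.List.pyGetD cols idx 0])) b) := by
  induction l generalizing a b with
  | nil => exact h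
  | cons i t ih =>
    simp only [List.foldl_cons]
    exact ih _ _ (pvInv_step _ _ h hnd) (PySem.Dict.nodup_keys_insert _ _ _ hnd)

-- ===== VERDICT (by name: the statement is the Claim_ definition above) =====
theorem row_col_dict_py_spec : Claim_equal_row_col_dict_py := by
  intro rows cols _ _
  unfold Spec_row_col_dict_py row_col_dict_py row_col_dict_py_alt
  exact pvInv_foldl rows cols _ PySem.Dict.empty PySem.Dict.empty rfl (by simp)
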